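-- pv_equiv track=rewrite | github.com/ibrakap/So-simple | Python3/upper.py | dolower
-- ===== SOURCE A (Python) =====
-- upper = ["A","B","C","D","E","F","G","H","I","J","K","L","M","N","O","P","Q","R","S","T","U","V","W","X","Y","Z"]
--
-- lower= ["a","b","c","d","e","f","g","h","i","j","k","l","m","n","o","p","q","r","s","t","u","v","w","x","y","z"]
--
-- def dolower(text):
-- 	temp=""
-- 	for i in text:
--                 for a in range(len(lower)):
--                         if i == lower[a]:
--                         	temp += lower[a]
--                 else:
--                         for f in range(len(upper)):
--                                 if i == upper[f]:
--                                 	temp += lower[f]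
-- 	return temp
-- ===== SOURCE B (Python) =====
-- def dolower(text):
--     out = []
--     for c in text:
--         if 'a' <= c <= 'z':
--             out.append(c)
--         elif 'A' <= c <= 'Z':
--             out.append(chr(ord(c) + 32))
--     return ''.join(out)
-- ===== Notes on version B (the rewrite author's own statement) =====
-- stated objective: simpler
-- what changed: Replaced the two nested 26-element table scans per character (plus the misleading for/else) by a single pass that tests each character against the ASCII ranges and lowercases uppercase letters with ord/chr arithmetic, collecting into a list joined once.
import Mathlib
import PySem

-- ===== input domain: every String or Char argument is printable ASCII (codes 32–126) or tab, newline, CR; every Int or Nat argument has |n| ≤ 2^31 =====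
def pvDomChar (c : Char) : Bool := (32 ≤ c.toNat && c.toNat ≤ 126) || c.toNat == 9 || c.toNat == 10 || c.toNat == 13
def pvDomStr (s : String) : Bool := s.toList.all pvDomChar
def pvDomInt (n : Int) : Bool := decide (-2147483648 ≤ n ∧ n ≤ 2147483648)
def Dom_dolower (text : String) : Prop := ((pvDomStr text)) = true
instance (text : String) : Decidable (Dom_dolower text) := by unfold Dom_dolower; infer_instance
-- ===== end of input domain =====

-- B drops the 26-element upper/lower tables and their nested scans: one pass, ASCII range tests, ord+32 arithmetic (simpler).

-- ===== PORT A =====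
def pvLower : List Char :=
  ['a','b','c','d','e','f','g','h','i','j','k','l','m','n','o','p','q','r','s','t','u','v','w','x','y','z']
def pvUpper : List Char :=
  ['A','B','C','D','E','F','G','H','I','J','K','L','M','N','O','P','Q','R','S','T','U','V','W','X','Y','Z']

def dolower (text : String) : String :=
  String.mk (text.toList.foldl (fun temp i =>
    -- inner for a in range(len(lower)); the for/else always runs the second loop (no break)
    let temp := (PySem.List.pyRange 0 (Int.ofNat pvLower.length) 1).foldl
      (fun t a => if i = PySem.List.pyGetD pvLower a ' ' then t ++ [PySem.List.pyGetD pvLower a ' '] else t) temp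
    (PySem.List.pyRange 0 (Int.ofNat pvUpper.length) 1).foldl
      (fun t f => if i = PySem.List.pyGetD pvUpper f ' ' then t ++ [PySem.List.pyGetD pvLower f ' '] else t) temp) [])

-- ===== PORT B =====
def dolower_alt (text : String) : String :=
  String.mk (text.toList.foldl (fun out c =>
    if 'a' ≤ c ∧ c ≤ 'z' then out ++ [c]
    else if 'A' ≤ c ∧ c ≤ 'Z' then out ++ [Char.ofNat (c.toNat + 32)]
    else out) [])

-- ===== PRECONDITION & SPEC =====
def Spec_dolower (text : String) (out : String) : Prop := out = dolower_alt text
instance (text : String) (out : String) : Decidable (Spec_dolower text out) := by unfold Spec_dolower; infer_instance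

-- ===== CLAIM (what is proved, stated in full; the proofs are below) =====
def Claim_equal_dolower : Prop := ∀ (text : String), Dom_dolower text → Spec_dolower text (dolower text)

-- ===== LEMMAS AND PROOFS =====

-- per-character contribution, shared characterisation of both loops
def pvContrib (c : Char) : List Char :=
  if 'a' ≤ c ∧ c ≤ 'z' then [c]
  else if 'A' ≤ c ∧ c ≤ 'Z' then [Char.ofNat (c.toNat + 32)]
  else []

lemma b_step (out : List Char) (c : Char) :
    (if 'a' ≤ c ∧ c ≤ 'z' then out ++ [c]
     else if 'A' ≤ c ∧ c ≤ 'Z' then out ++ [Char.ofNat (c.toNat + 32)]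
     else out) = out ++ pvContrib c := by
  unfold pvContrib; split_ifs <;> simp

lemma b_foldl (l : List Char) (out : List Char) :
    l.foldl (fun out c =>
      if 'a' ≤ c ∧ c ≤ 'z' then out ++ [c]
      else if 'A' ≤ c ∧ c ≤ 'Z' then out ++ [Char.ofNat (c.toNat + 32)]
      else out) out = out ++ l.flatMap pvContrib := by
  induction l generalizing out with
  | nil => simp
  | cons c l ih =>
    simp only [List.foldl_cons]
    rw [b_step, ih]
    simp [List.flatMap_cons]

set_option maxRecDepth 8000 in
set_option maxHeartbeats 2000000 in
lemma a_char (n : Nat) (h : n < 127) :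
    ((PySem.List.pyRange 0 (Int.ofNat pvLower.length) 1).filter
        (fun a => decide (Char.ofNat n = PySem.List.pyGetD pvLower a ' '))).map
        (fun a => PySem.List.pyGetD pvLower a ' ')
    ++ ((PySem.List.pyRange 0 (Int.ofNat pvUpper.length) 1).filter
        (fun f => decide (Char.ofNat n = PySem.List.pyGetD pvUpper f ' '))).map
        (fun f => PySem.List.pyGetD pvLower f ' ')
    = pvContrib (Char.ofNat n) := by
  revert h; revert n; decide

lemma a_step (temp : List Char) (i : Char) (hd : pvDomChar i = true) :
    (let temp := (PySem.List.pyRange 0 (Int.ofNat pvLower.length) 1).foldl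
      (fun t a => if i = PySem.List.pyGetD pvLower a ' ' then t ++ [PySem.List.pyGetD pvLower a ' '] else t) temp
    (PySem.List.pyRange 0 (Int.ofNat pvUpper.length) 1).foldl
      (fun t f => if i = PySem.List.pyGetD pvUpper f ' ' then t ++ [PySem.List.pyGetD pvLower f ' '] else t) temp)
    = temp ++ pvContrib i := by
  have hn : i.toNat < 127 := by
    simp only [pvDomChar, Bool.or_eq_true, Bool.and_eq_true, decide_eq_true_eq,
      beq_iff_eq] at hd
    omega
  have hi : Char.ofNat i.toNat = i := Char.ofNat_toNat i
  rw [PySem.List.foldl_append_ite, PySem.List.foldl_append_ite, List.append_assoc]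
  rw [← hi, a_char i.toNat hn]

lemma a_foldl (l : List Char) (temp : List Char) (hd : l.all pvDomChar = true) :
    l.foldl (fun temp i =>
      let temp := (PySem.List.pyRange 0 (Int.ofNat pvLower.length) 1).foldl
        (fun t a => if i = PySem.List.pyGetD pvLower a ' ' then t ++ [PySem.List.pyGetD pvLower a ' '] else t) temp
      (PySem.List.pyRange 0 (Int.ofNat pvUpper.length) 1).foldl
        (fun t f => if i = PySem.List.pyGetD pvUpper f ' ' then t ++ [PySem.List.pyGetD pvLower f ' '] else t) temp)
      temp = temp ++ l.flatMap pvContrib := by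
  induction l generalizing temp with
  | nil => simp
  | cons c l ih =>
    simp only [List.all_cons, Bool.and_eq_true] at hd
    simp only [List.foldl_cons]
    rw [a_step temp c hd.1, ih _ hd.2]
    simp [List.flatMap_cons]

-- ===== VERDICT (by name: the statement is the Claim_ definition above) =====
theorem dolower_spec : Claim_equal_dolower := by
  intro text hdom
  unfold Spec_dolower dolower dolower_alt
  rw [a_foldl _ _ hdom, b_foldl]
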